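-- pv_equiv track=rewrite | github.com/Pokecraft-exe/Light-sharp | LScc.py | notab
-- ===== SOURCE A (Python) =====
-- def notab(string):
--     isinstring = 0
--     first = ""
--     nstr = ""
--     for i in range(len(string)):
--         if string[i] == " ":
--             if isinstring == 1:
--                 nstr = nstr + string[i]
--         elif string[i] == '"':
--             if isinstring == 1:
--                 if string[i] == first:
--                     isinstring = 0
--             else:
--                 isinstring = 1
--                 first = '"'
--             nstr = nstr + string[i]
--         elif string[i] == "'":
--             if isinstring == 1:
--                 if string[i] == first:
--                     isinstring = 0
--             else:
--                 isinstring = 1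
--                 first = "'"
--             nstr = nstr + string[i]
--         else:
--             nstr = nstr + string[i]
--
--     return nstr
-- ===== SOURCE B (Python) =====
-- def notab(string):
--     out = []
--     i = 0
--     n = len(string)
--     while i < n:
--         c = string[i]
--         if c == '"' or c == "'":
--             j = string.find(c, i + 1)
--             if j == -1:
--                 out.append(string[i:])
--                 i = n
--             else:
--                 out.append(string[i:j + 1])
--                 i = j + 1
--         elif c == " ":
--             i += 1
--         else:
--             out.append(c)
--             i += 1
--     return "".join(out)
-- ===== Notes on version B (the rewrite author's own statement) =====
-- stated objective: idiomatic
-- what changed: Replaces the per-character state-flag loop with an index scan that jumps over whole quoted segments using str.find and appends slices, removing the isinstring/first state entirely.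
import Mathlib
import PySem

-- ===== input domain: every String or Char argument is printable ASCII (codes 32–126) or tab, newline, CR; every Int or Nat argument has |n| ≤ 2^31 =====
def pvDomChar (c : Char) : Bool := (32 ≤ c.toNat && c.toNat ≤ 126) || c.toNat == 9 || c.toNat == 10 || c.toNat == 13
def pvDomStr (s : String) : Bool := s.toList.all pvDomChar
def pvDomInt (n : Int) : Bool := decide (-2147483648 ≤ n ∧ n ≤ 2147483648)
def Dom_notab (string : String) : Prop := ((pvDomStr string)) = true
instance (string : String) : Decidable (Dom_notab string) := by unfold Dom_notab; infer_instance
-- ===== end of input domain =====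

-- B removes unquoted spaces by jumping over quoted segments with a find-the-closing-quote scan instead of A's per-char isinstring/first state flags.

-- ===== PORT A =====
-- A's loop state (isinstring, first, nstr); nstr kept as List Char, String.mk at the end.
def notabStep (st : Int × String × List Char) (c : Char) : Int × String × List Char :=
  let (isin, first, nstr) := st
  if c = ' ' then
    (if isin = 1 then (isin, first, nstr ++ [c]) else (isin, first, nstr))
  else if c = '"' then
    (if isin = 1 then
       (if String.singleton c = first then (0, first, nstr ++ [c]) else (isin, first, nstr ++ [c]))
     else (1, "\"", nstr ++ [c]))
  else if c = '\'' then
    (if isin = 1 then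
       (if String.singleton c = first then (0, first, nstr ++ [c]) else (isin, first, nstr ++ [c]))
     else (1, "'", nstr ++ [c]))
  else (isin, first, nstr ++ [c])

def notab (string : String) : String :=
  String.mk ((string.toList.foldl notabStep (0, "", [])).2.2)

-- ===== PORT B =====
-- B's scan: at a quote, find the matching close (list index = str.find from i+1) and copy the segment whole.
def notabGo : List Char → List Char
  | [] => []
  | c :: rest =>
    if c = '"' ∨ c = '\'' then
      match rest.idxOf? c with
      | some j => (c :: rest.take (j + 1)) ++ notabGo (rest.drop (j + 1))
      | none => c :: rest
    else if c = ' ' then notabGo rest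
    else c :: notabGo rest
termination_by cs => cs.length
decreasing_by all_goals (simp only [List.length_drop, List.length_cons]; omega)

def notab_alt (string : String) : String := String.mk (notabGo string.toList)

-- ===== PRECONDITION & SPEC =====
def Spec_notab (string : String) (out : String) : Prop := out = notab_alt string
instance (string : String) (out : String) : Decidable (Spec_notab string out) := by unfold Spec_notab; infer_instance

-- ===== CLAIM (what is proved, stated in full; the proofs are below) =====
def Claim_equal_notab : Prop := ∀ (string : String), Dom_notab string → Spec_notab string (notab string)

-- ===== LEMMAS AND PROOFS =====

theorem notabGo_nil : notabGo [] = [] := by rw [notabGo.eq_def]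

theorem notabGo_cons (c : Char) (rest : List Char) :
    notabGo (c :: rest) =
      (if c = '"' ∨ c = '\'' then
        match rest.idxOf? c with
        | some j => (c :: rest.take (j + 1)) ++ notabGo (rest.drop (j + 1))
        | none => c :: rest
      else if c = ' ' then notabGo rest
      else c :: notabGo rest) := by
  rw [notabGo.eq_def]

-- Inside a quoted segment opened by q: if a closing q exists at index j, the fold copies
-- the segment verbatim and returns to the outside state; otherwise it copies everything.
theorem notab_inside (q : Char) (hq : q = '"' ∨ q = '\'') :
    ∀ (cs : List Char) (acc : List Char),
      (∀ j, cs.idxOf? q = some j →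
        cs.foldl notabStep (1, String.singleton q, acc)
          = (cs.drop (j + 1)).foldl notabStep (0, String.singleton q, acc ++ cs.take (j + 1))) ∧
      (cs.idxOf? q = none →
        (cs.foldl notabStep (1, String.singleton q, acc)).2.2 = acc ++ cs) := by
  intro cs
  induction cs with
  | nil =>
    intro acc
    refine ⟨?_, ?_⟩
    · intro j h; simp [List.idxOf?_nil] at h
    · intro _; simp
  | cons d rest ih =>
    intro acc
    by_cases hd : d = q
    · subst hd
      have hstep : notabStep (1, String.singleton d, acc) d = (0, String.singleton d, acc ++ [d]) := by
        rcases hq with h | h <;> subst h <;> simp [notabStep, String.singleton]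
      refine ⟨?_, ?_⟩
      · intro j h
        have : (d :: rest).idxOf? d = some 0 := by simp [List.idxOf?_cons]
        rw [this] at h; injection h with h; subst h
        simp [List.foldl, hstep]
      · intro h
        have : (d :: rest).idxOf? d = some 0 := by simp [List.idxOf?_cons]
        rw [this] at h; exact absurd h (by simp)
    · have hstep : notabStep (1, String.singleton q, acc) d
          = (1, String.singleton q, acc ++ [d]) := by
        have hne : String.singleton d ≠ String.singleton q := by
          intro h
          have h2 := congrArg String.toList h
          simp [String.singleton, String.toList_push] at h2
          exact hd h2
        by_cases h1 : d = ' '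
        · subst h1; simp [notabStep]
        · by_cases h2 : d = '"'
          · subst h2; simp [notabStep, hne]
          · by_cases h3 : d = '\''
            · subst h3; simp [notabStep, h2, hne]
            · simp [notabStep, h1, h2, h3]
      have hidx : (d :: rest).idxOf? q = (rest.idxOf? q).map (· + 1) := by
        simp [List.idxOf?_cons, hd]
      refine ⟨?_, ?_⟩
      · intro j h
        rw [hidx] at h
        cases hr : rest.idxOf? q with
        | none => rw [hr] at h; simp at h
        | some j' =>
          rw [hr] at h; simp at h
          subst h
          simp only [List.foldl, hstep]
          have := (ih (acc ++ [d])).1 j' hr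
          rw [this]
          simp [List.take, List.drop]
      · intro h
        rw [hidx] at h
        cases hr : rest.idxOf? q with
        | none =>
          simp only [List.foldl, hstep]
          have := (ih (acc ++ [d])).2 hr
          rw [this]; simp
        | some j' => rw [hr] at h; simp at h

-- Outside any quote: the fold from state (0, first, acc) produces acc ++ notabGo cs,
-- for any leftover `first` (it is overwritten on re-entering a quote).
theorem notab_outside :
    ∀ (n : Nat) (cs : List Char), cs.length ≤ n → ∀ (acc : List Char) (first : String),
      (cs.foldl notabStep (0, first, acc)).2.2 = acc ++ notabGo cs := by
  intro n
  induction n with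
  | zero =>
    intro cs h acc first
    have : cs = [] := by cases cs <;> simp_all
    subst this; simp [notabGo_nil]
  | succ n ih =>
    intro cs h acc first
    cases cs with
    | nil => simp [notabGo_nil]
    | cons c rest =>
      simp only [List.length_cons] at h
      by_cases hq : c = '"' ∨ c = '\''
      · have hstep : notabStep (0, first, acc) c = (1, String.singleton c, acc ++ [c]) := by
          rcases hq with h' | h' <;> subst h' <;> simp [notabStep, String.singleton]
        simp only [List.foldl, hstep]
        cases hr : rest.idxOf? c with
        | some j =>
          have h1 := (notab_inside c hq rest (acc ++ [c])).1 j hr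
          rw [h1]
          have hlen : (rest.drop (j + 1)).length ≤ n := by
            have := List.length_drop (l := rest) (i := j + 1)
            omega
          rw [ih _ hlen]
          rw [notabGo_cons]
          simp [hq, hr]
        | none =>
          have h1 := (notab_inside c hq rest (acc ++ [c])).2 hr
          rw [h1]
          rw [notabGo_cons]
          simp [hq, hr]
      · rw [not_or] at hq
        obtain ⟨h2, h3⟩ := hq
        by_cases h1 : c = ' '
        · subst h1
          have hstep : notabStep (0, first, acc) ' ' = (0, first, acc) := by simp [notabStep]
          simp only [List.foldl, hstep]
          rw [ih rest (by omega)]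
          rw [notabGo_cons]; simp [h2, h3]
        · have hstep : notabStep (0, first, acc) c = (0, first, acc ++ [c]) := by
            simp [notabStep, h1, h2, h3]
          simp only [List.foldl, hstep]
          rw [ih rest (by omega)]
          rw [notabGo_cons]
          simp [h1, h2, h3]

-- ===== VERDICT (by name: the statement is the Claim_ definition above) =====
theorem notab_spec : Claim_equal_notab := by
  intro string _
  unfold Spec_notab notab notab_alt
  rw [notab_outside string.toList.length string.toList le_rfl [] ""]
  simp
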